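-- pv_equiv track=rewrite | github.com/fu-group/fu | src/lib.py | NumericListToText
-- ===== SOURCE A (Python) =====
-- def NumericListToText(intlst,header,sep,width,colu,nw):
--     # intlst: [1,2,3,..], sep:separtor, i.e. ','
--     strlst=[]
--     wid=width
--     if width < 0:
--         maxval=max(intlst); wid=len(str(maxval))+1
--     for i in intlst:
--         strlst.append(str(i))
--     text=StringListToText(strlst,header,sep,wid,colu,nw)
--     return text
--
-- def StringListToText(strlst,header,sep,width,colu,nw):
--     # strlst: ['a','b','c',...], width:element width
--     # example: header='  frgnam(1)='; sep=','; width=-1; colu=5; nw=5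
--     text=''
--     blk=' '; eol='\n'
--     nt=len(strlst); nl=nt/nw+1; nh=len(header)
--     ic=-1; k=-1
--     while ic < nt-1:
--         k += 1; hd=header
--         if k > 0: hd=nh*blk
--         line=colu*blk+hd
--         for j in range(nw):
--             ic += 1
--             stri=strlst[ic]; ns=len(stri)
--             if width > 0:
--                 if ns < width: stri=(width-ns)*blk+stri
--                 elif ns > width: stri=str[:width]
--             if ic >= nt-1:
--                 line=line+stri; break
--             else: line=line+stri+sep
--         text=text+line+eol
--     return text
-- ===== SOURCE B (Python) =====
-- # B: chunk-and-render decomposition — slice the string list into rows and render each row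
-- # with a join, instead of A's flat while-loop with manual ic/k counters and an in-loop break.
-- def _fmt(s, wid):
--     return ' ' * (wid - len(s)) + s if wid > 0 else s
--
-- def NumericListToText(intlst, header, sep, width, colu, nw):
--     if not intlst:
--         return ''
--     wid = len(str(max(intlst))) + 1 if width < 0 else width
--     rem = [str(i) for i in intlst]
--     text = ''
--     first = True
--     while rem:
--         row, rem = rem[:nw], rem[nw:]
--         hd = header if first else ' ' * len(header)
--         first = False
--         body = sep.join(_fmt(s, wid) for s in row)
--         text += ' ' * colu + hd + body + (sep if rem else '') + '\n'
--     return text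
-- ===== Notes on version B (the rewrite author's own statement) =====
-- stated objective: simpler
-- what changed: Replaces A's flat while-loop over a manual element index ic with k/break bookkeeping by a chunk-and-render decomposition: slice the string list into rows of nw and emit each row as a sep.join of right-justified fields plus a trailing sep for non-final rows.
-- outside the precondition, e.g. on NumericListToText([], 'h', ',', -1, 0, 2): A raises ValueError, B returns ''; on NumericListToText([], 'h', ',', 0, 0, 0): A raises ZeroDivisionError, B returns ''; on NumericListToText([123], 'h', ',', 2, 0, 1): A raises TypeError, B returns 'h123\n'
import Mathlib
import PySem

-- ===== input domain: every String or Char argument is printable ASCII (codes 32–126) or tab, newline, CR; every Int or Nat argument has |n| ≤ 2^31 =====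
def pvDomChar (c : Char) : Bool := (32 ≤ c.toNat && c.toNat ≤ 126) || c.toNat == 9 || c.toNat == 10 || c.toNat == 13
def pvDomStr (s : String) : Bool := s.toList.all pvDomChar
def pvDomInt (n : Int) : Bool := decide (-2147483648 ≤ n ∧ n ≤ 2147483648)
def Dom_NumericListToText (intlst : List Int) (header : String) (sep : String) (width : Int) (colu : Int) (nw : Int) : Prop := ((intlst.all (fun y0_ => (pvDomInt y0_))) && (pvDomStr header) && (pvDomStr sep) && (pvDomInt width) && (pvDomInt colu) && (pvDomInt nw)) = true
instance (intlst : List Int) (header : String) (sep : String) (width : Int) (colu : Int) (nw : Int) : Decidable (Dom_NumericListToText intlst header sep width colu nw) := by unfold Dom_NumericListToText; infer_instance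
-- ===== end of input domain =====

-- B changes the decomposition: slice the string list into rows and render each row with a join,
-- instead of A's flat while-loop over element indices with manual ic/k counters and an in-loop break.
-- Both ports build strings on List Char and pack with String.ofList at the end (exact for Python's str ++).

-- ===== PORT A =====
-- the element-formatting if-chain from StringListToText's inner loop
def pvFmtA (width : Int) (stri : List Char) : List Char :=
  let ns : Int := stri.length
  if width > 0 then
    if ns < width then List.replicate (width - ns).toNat ' ' ++ stri
    else if ns > width then stri  -- Python executes `str[:width]` here: TypeError; excluded by Pre_
    else stri
  else stri

-- the inner `for j in range(nw)` loop: j counts down, ic/line are the loop state; returns them at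
-- normal exit or at the `break`
def pvAInner (strlst : List (List Char)) (sep : List Char) (width nt : Int) :
    Nat → Int → List Char → Int × List Char
  | 0, ic, line => (ic, line)
  | j + 1, ic, line =>
    let ic := ic + 1
    let stri := (PySem.List.pyGet? strlst ic).getD []  -- index is always in range when this line runs (a raise is impossible; see the proofs)
    let stri := pvFmtA width stri
    if ic ≥ nt - 1 then (ic, line ++ stri)
    else pvAInner strlst sep width nt j ic (line ++ stri ++ sep)

-- the outer `while ic < nt-1` loop; fuel bounds the iteration count (nt+1 suffices when nw ≥ 1,
-- the only case where the Python loop terminates)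
def pvAOuter (strlst : List (List Char)) (header sep : List Char) (width colu nw nt : Int) :
    Nat → Int → Int → List Char → List Char
  | 0, _, _, text => text
  | fuel + 1, ic, k, text =>
    if ic < nt - 1 then
      let k := k + 1
      let hd := if k > 0 then List.replicate header.length ' ' else header
      let line := List.replicate colu.toNat ' ' ++ hd
      let r := pvAInner strlst sep width nt nw.toNat ic line
      pvAOuter strlst header sep width colu nw nt fuel r.1 k (text ++ r.2 ++ ['\n'])
    else text

def NumericListToText (intlst : List Int) (header : String) (sep : String) (width : Int) (colu : Int) (nw : Int) : String :=
  let wid : Int :=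
    if width < 0 then
      ((PySem.Int.toChars ((PySem.List.max? intlst (fun x => x)).getD 0)).length : Int) + 1
      -- max([]) raises ValueError (width < 0 with empty list is excluded by Pre_); getD 0 is never read
    else width
  let strlst := intlst.map PySem.Int.toChars
  let nt : Int := strlst.length
  -- nl = nt/nw+1 is computed and never used; nw = 0 raises ZeroDivisionError there (excluded by Pre_)
  String.ofList (pvAOuter strlst header.toList sep.toList wid colu nw nt (strlst.length + 1) (-1) (-1) [])

-- ===== PORT B =====
def pvBFmt (wid : Int) (s : List Char) : List Char :=
  if wid > 0 then List.replicate (wid - (s.length : Int)).toNat ' ' ++ s else s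

-- the `while rem:` loop of Source B: peel off a row of nw, render it, recurse on the rest
def pvBLoop (header sep : List Char) (wid colu nw : Int) :
    Bool → List (List Char) → List Char → List Char
  | _, [], text => text
  | first, x :: xs, text =>
    let row := (x :: xs).take nw.toNat          -- rem[:nw]  (exact for nw ≥ 1; nw ≤ 0 loops forever in Python)
    let rem := xs.drop (nw.toNat - 1)           -- rem[nw:]  (same slice, written on the tail for termination)
    let hd := if first then header else List.replicate header.length ' '
    let body := PySem.Chars.join sep (row.map (pvBFmt wid))
    let line := List.replicate colu.toNat ' ' ++ hd ++ body ++ (if rem.isEmpty then [] else sep)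
    pvBLoop header sep wid colu nw false rem (text ++ line ++ ['\n'])
termination_by _ l _ => l.length
decreasing_by simpa using Nat.lt_succ_of_le (Nat.le_trans (List.length_drop ▸ Nat.sub_le _ _) (Nat.le_refl _))

def NumericListToText_alt (intlst : List Int) (header : String) (sep : String) (width : Int) (colu : Int) (nw : Int) : String :=
  if intlst.isEmpty then "" else
  let wid : Int :=
    if width < 0 then
      ((PySem.Int.toChars ((PySem.List.max? intlst (fun x => x)).getD 0)).length : Int) + 1
    else width
  let strlst := intlst.map PySem.Int.toChars
  String.ofList (pvBLoop header.toList sep.toList wid colu nw true strlst [])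

-- ===== PRECONDITION & SPEC =====
-- Pre_ excludes exactly the inputs where Python A does not return: nw = 0 (ZeroDivisionError at
-- nt/nw), width < 0 on an empty list (ValueError from max([])), nw < 0 or nw = 0 on a non-empty
-- list (the while loop never terminates / ZeroDivisionError), and any element whose str is longer
-- than the positive effective width (TypeError from the `str[:width]` slip).
def Pre_NumericListToText (intlst : List Int) (header : String) (sep : String) (width : Int) (colu : Int) (nw : Int) : Prop :=
  if intlst = [] then 0 ≤ width ∧ nw ≠ 0
  else 1 ≤ nw ∧ ∀ i ∈ intlst,
    (if width < 0 then ((PySem.Int.toChars ((PySem.List.max? intlst (fun x => x)).getD 0)).length : Int) + 1 else width) ≤ 0 ∨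
    ((PySem.Int.toChars i).length : Int) ≤
    (if width < 0 then ((PySem.Int.toChars ((PySem.List.max? intlst (fun x => x)).getD 0)).length : Int) + 1 else width)
instance (intlst : List Int) (header : String) (sep : String) (width : Int) (colu : Int) (nw : Int) : Decidable (Pre_NumericListToText intlst header sep width colu nw) := by unfold Pre_NumericListToText; infer_instance

def pvWitness_NumericListToText : List Int × String × String × Int × Int × Int := ([1, 22, 3], "h=", ",", 3, 2, 2)

def Spec_NumericListToText (intlst : List Int) (header : String) (sep : String) (width : Int) (colu : Int) (nw : Int) (out : String) : Prop := out = NumericListToText_alt intlst header sep width colu nw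
instance (intlst : List Int) (header : String) (sep : String) (width : Int) (colu : Int) (nw : Int) (out : String) : Decidable (Spec_NumericListToText intlst header sep width colu nw out) := by unfold Spec_NumericListToText; infer_instance

-- ===== CLAIM (what is proved, stated in full; the proofs are below) =====
def Claim_equal_NumericListToText : Prop := ∀ (intlst : List Int) (header : String) (sep : String) (width : Int) (colu : Int) (nw : Int), Dom_NumericListToText intlst header sep width colu nw → Pre_NumericListToText intlst header sep width colu nw → Spec_NumericListToText intlst header sep width colu nw (NumericListToText intlst header sep width colu nw)

-- ===== LEMMAS AND PROOFS =====

theorem pv_fmt_eq (w : Int) (s : List Char) (h : w ≤ 0 ∨ (s.length : Int) ≤ w) :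
    pvFmtA w s = pvBFmt w s := by
  unfold pvFmtA pvBFmt
  by_cases hw : w > 0
  · have hle : (s.length : Int) ≤ w := by rcases h with h | h <;> omega
    simp only [if_pos hw]
    by_cases hlt : (s.length : Int) < w
    · simp [hlt]
    · simp [hlt, show ¬ ((s.length : Int) > w) by omega,
        show (w - (s.length : Int)).toNat = 0 by omega]
  · simp [hw]

-- trailing-separator join: concatenating (fmt x ++ sep) over a non-empty row is join ++ sep
theorem pv_cat_eq_join (sep : List Char) (f : List Char → List Char) (l : List (List Char)) (h : l ≠ []) :
    (l.map (fun s => f s ++ sep)).flatten = PySem.Chars.join sep (l.map f) ++ sep := by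
  induction l with
  | nil => exact absurd rfl h
  | cons x t ih =>
    cases t with
    | nil => simp [PySem.Chars.join_singleton]
    | cons y t' =>
      simp only [List.map_cons, List.flatten_cons] at ih ⊢
      rw [ih (by simp), PySem.Chars.join_cons_cons]
      simp

-- the inner loop characterised: starting just before position p, it formats the elements of
-- drop p, breaking (with no trailing sep) exactly when it reaches the last element
theorem pv_inner (strlst : List (List Char)) (sep : List Char) (w : Int)
    (Hf : ∀ s ∈ strlst, pvFmtA w s = pvBFmt w s) :
    ∀ (j p : Nat) (line : List Char), p < strlst.length →
    pvAInner strlst sep w (strlst.length : Int) j ((p : Int) - 1) line =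
      if strlst.length ≤ p + j then
        ((strlst.length : Int) - 1,
          line ++ PySem.Chars.join sep ((strlst.drop p).map (pvBFmt w)))
      else
        (((p + j : Nat) : Int) - 1,
          line ++ (((strlst.drop p).take j).map (fun s => pvBFmt w s ++ sep)).flatten) := by
  intro j
  induction j with
  | zero =>
    intro p line hp
    rw [if_neg (by omega)]
    simp [pvAInner]
  | succ j ih =>
    intro p line hp
    have harith : (p : Int) - 1 + 1 = (p : Int) := by ring
    have hget : (PySem.List.pyGet? strlst ((p : Int))).getD [] = strlst[p] := by
      rw [PySem.List.pyGet?_natCast]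
      simp [List.getElem?_eq_getElem hp]
    have hmem : strlst[p] ∈ strlst := List.getElem_mem hp
    have hdrop : strlst.drop p = strlst[p] :: strlst.drop (p + 1) :=
      List.drop_eq_getElem_cons hp
    simp only [pvAInner, harith, hget]
    by_cases hbr : (p : Int) ≥ (strlst.length : Int) - 1
    · rw [if_pos hbr, if_pos (by omega : strlst.length ≤ p + (j + 1))]
      have hpe : p + 1 = strlst.length := by omega
      have hnil : strlst.drop (p + 1) = [] := List.drop_eq_nil_of_le (by omega)
      rw [hdrop, hnil]
      simp [PySem.Chars.join_singleton, Hf _ hmem]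
      omega
    · rw [if_neg hbr]
      have hp1 : p + 1 < strlst.length := by omega
      have hrec := ih (p + 1) (line ++ pvFmtA w strlst[p] ++ sep) hp1
      rw [show ((p : Int)) = ((p + 1 : Nat) : Int) - 1 by push_cast; ring, hrec]
      by_cases hfin : strlst.length ≤ (p + 1) + j
      · rw [if_pos hfin, if_pos (by omega : strlst.length ≤ p + (j + 1))]
        have hdrop1 : strlst.drop (p + 1) = strlst[p + 1] :: strlst.drop (p + 2) :=
          List.drop_eq_getElem_cons hp1
        rw [hdrop, hdrop1]
        simp only [List.map_cons]
        rw [PySem.Chars.join_cons_cons, Hf _ hmem]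
        simp
      · rw [if_neg hfin, if_neg (by omega : ¬ strlst.length ≤ p + (j + 1))]
        rw [hdrop, List.take_succ_cons, List.map_cons, List.flatten_cons, Hf _ hmem,
          show ((p + 1 + j : Nat) : Int) = ((p + (j + 1) : Nat) : Int) by push_cast; ring]
        simp

-- the outer loop equals B's row loop from the same position
-- (first = true only on the very first iteration, where A's k is still -1)
theorem pv_outer (strlst : List (List Char)) (header sep : List Char) (w colu nw : Int)
    (hnw : 1 ≤ nw) (Hf : ∀ s ∈ strlst, pvFmtA w s = pvBFmt w s) :
    ∀ (fuel : Nat) (p : Nat) (k : Int) (first : Bool) (text : List Char),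
      p ≤ strlst.length →
      strlst.length ≤ p + fuel * nw.toNat →
      (first = true → k = -1) → (first = false → 0 ≤ k) →
      pvAOuter strlst header sep w colu nw (strlst.length : Int) fuel ((p : Int) - 1) k text =
      pvBLoop header sep w colu nw first (strlst.drop p) text := by
  intro fuel
  induction fuel with
  | zero =>
    intro p k first text hple hfuel _ _
    have hpe : p = strlst.length := by omega
    rw [List.drop_eq_nil_of_le (by omega)]
    simp [pvAOuter, pvBLoop]
  | succ fuel ih =>
    intro p k first text hple hfuel hkt hkf
    by_cases hp : p < strlst.length
    · simp only [pvAOuter]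
      rw [if_pos (show ((p : Int) - 1) < (strlst.length : Int) - 1 by omega)]
      have hnwN : 1 ≤ nw.toNat := by omega
      obtain ⟨x, xs, hcons⟩ : ∃ x xs, strlst.drop p = x :: xs := by
        cases h : strlst.drop p with
        | nil => exact absurd (List.drop_eq_nil_iff.mp h) (by omega)
        | cons a b => exact ⟨a, b, rfl⟩
      have hhd : (if k + 1 > 0 then List.replicate header.length ' ' else header)
          = (if first then header else List.replicate header.length ' ') := by
        cases first with
        | true => rw [hkt rfl]; simp
        | false => have := hkf rfl; rw [if_pos (by omega), if_neg (by simp)]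
      have hrem : xs.drop (nw.toNat - 1) = strlst.drop (p + nw.toNat) := by
        have h2 : strlst.drop (p + nw.toNat) = (strlst.drop p).drop nw.toNat := by
          rw [List.drop_drop]
        rw [h2, hcons]
        cases hn : nw.toNat with
        | zero => omega
        | succ m => simp
      have hinner := pv_inner strlst sep w Hf nw.toNat p
        (List.replicate colu.toNat ' ' ++ (if k + 1 > 0 then List.replicate header.length ' ' else header)) hp
      have hmul : (fuel + 1) * nw.toNat = fuel * nw.toNat + nw.toNat := by ring
      rw [hcons]
      simp only [pvBLoop, hrem]
      by_cases hfit : strlst.length ≤ p + nw.toNat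
      · rw [if_pos hfit] at hinner
        rw [hinner]
        have hrow : (x :: xs).take nw.toNat = strlst.drop p := by
          rw [← hcons]
          exact List.take_of_length_le (by rw [List.length_drop]; omega)
        have hrem2 : strlst.drop (p + nw.toNat) = [] := List.drop_eq_nil_of_le (by omega)
        have := ih strlst.length (k + 1) false
          (text ++ (List.replicate colu.toNat ' ' ++ (if k + 1 > 0 then List.replicate header.length ' ' else header) ++
            PySem.Chars.join sep ((strlst.drop p).map (pvBFmt w))) ++ ['\n'])
          (Nat.le_refl _) (by omega) (by simp) (fun _ => by have := hkt; have := hkf; cases first with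
            | true => have := hkt rfl; omega
            | false => have := hkf rfl; omega)
        rw [this, List.drop_eq_nil_of_le (Nat.le_refl _)]
        rw [hrow, hrem2, hhd]
        simp [pvBLoop]
      · rw [if_neg hfit] at hinner
        rw [hinner]
        have hrow : (x :: xs).take nw.toNat = (strlst.drop p).take nw.toNat := by rw [hcons]
        have hrem2 : strlst.drop (p + nw.toNat) ≠ [] := by
          rw [Ne, List.drop_eq_nil_iff]; omega
        have := ih (p + nw.toNat) (k + 1) false
          (text ++ (List.replicate colu.toNat ' ' ++ (if k + 1 > 0 then List.replicate header.length ' ' else header) ++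
            (((strlst.drop p).take nw.toNat).map (fun s => pvBFmt w s ++ sep)).flatten) ++ ['\n'])
          (by omega) (by omega) (by simp) (fun _ => by cases first with
            | true => have := hkt rfl; omega
            | false => have := hkf rfl; omega)
        rw [this]
        have hcat := pv_cat_eq_join sep (pvBFmt w) ((strlst.drop p).take nw.toNat)
          (by rw [hcons]; simp [List.take_eq_nil_iff]; omega)
        have hie : (strlst.drop (p + nw.toNat)).isEmpty = false := by
          simpa using hrem2
        congr 1
        rw [hcat, hhd]
        simp [hrow, hie]
    · have hpe : p = strlst.length := by omega
      rw [List.drop_eq_nil_of_le (by omega)]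
      simp only [pvAOuter, pvBLoop]
      rw [if_neg (by omega)]

-- ===== VERDICT (by name: the statement is the Claim_ definition above) =====
theorem NumericListToText_spec : Claim_equal_NumericListToText := by
  unfold Claim_equal_NumericListToText
  intro intlst header sep width colu nw _ hpre
  unfold Spec_NumericListToText NumericListToText NumericListToText_alt
  unfold Pre_NumericListToText at hpre
  cases intlst with
  | nil =>
    rw [if_pos rfl] at hpre
    simp [pvAOuter]
  | cons x t =>
    rw [if_neg (by simp)] at hpre
    obtain ⟨hnw, hfmt⟩ := hpre
    have Hf : ∀ s ∈ (x :: t).map PySem.Int.toChars,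
        pvFmtA (if width < 0 then ((PySem.Int.toChars ((PySem.List.max? (x :: t) (fun y => y)).getD 0)).length : Int) + 1 else width) s
        = pvBFmt (if width < 0 then ((PySem.Int.toChars ((PySem.List.max? (x :: t) (fun y => y)).getD 0)).length : Int) + 1 else width) s := by
      intro s hs
      obtain ⟨i, hi, rfl⟩ := List.mem_map.mp hs
      exact pv_fmt_eq _ _ (by simpa using hfmt i hi)
    have hnwN : 1 ≤ nw.toNat := by omega
    have hmul : (((x :: t).map PySem.Int.toChars).length + 1) * 1 ≤
        (((x :: t).map PySem.Int.toChars).length + 1) * nw.toNat :=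
      Nat.mul_le_mul_left _ hnwN
    have hout := pv_outer ((x :: t).map PySem.Int.toChars) header.toList sep.toList
      (if width < 0 then ((PySem.Int.toChars ((PySem.List.max? (x :: t) (fun y => y)).getD 0)).length : Int) + 1 else width)
      colu nw hnw Hf
      (((x :: t).map PySem.Int.toChars).length + 1) 0 (-1) true []
      (Nat.zero_le _) (by omega) (fun _ => rfl) (by simp)
    have h01 : ((0 : Nat) : Int) - 1 = -1 := by norm_num
    rw [h01, List.drop_zero] at hout
    rw [if_neg (by simp : ¬ ((x :: t).isEmpty = true))]
    exact congrArg String.ofList hout
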